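-- pv_equiv track=rewrite | github.com/ittadoru/SaverBot | utils/download_files/youtube_utils.py | _pick_low
-- ===== SOURCE A (Python) =====
-- def _pick_low(res_to_itag: dict[int, int]) -> tuple[int, int] | None:
--     if not res_to_itag:
--         return None
--     if 360 in res_to_itag:
--         return res_to_itag[360], 360
--
--     below_360 = sorted(res for res in res_to_itag if res < 360)
--     if below_360:
--         target = below_360[0]
--         return res_to_itag[target], target
--
--     return None
-- ===== SOURCE B (Python) =====
-- def _pick_low(res_to_itag: dict[int, int]) -> tuple[int, int] | None:
--     itag_360 = None
--     best_res = None
--     best_itag = None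
--     for res, itag in res_to_itag.items():
--         if res == 360 and itag_360 is None:
--             itag_360 = itag
--         elif res < 360 and (best_res is None or res < best_res):
--             best_res, best_itag = res, itag
--     if itag_360 is not None:
--         return itag_360, 360
--     if best_res is not None:
--         return best_itag, best_res
--     return None
-- ===== Notes on version B (the rewrite author's own statement) =====
-- stated objective: alternative
-- what changed: Replaced A's two-phase approach (membership test for 360, then a sorted() of all below-360 keys to take its first element) by one linear scan over the items that simultaneously captures the 360 itag and maintains the running minimum below-360 entry, deciding from the two accumulators after the loop.
import Mathlib
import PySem

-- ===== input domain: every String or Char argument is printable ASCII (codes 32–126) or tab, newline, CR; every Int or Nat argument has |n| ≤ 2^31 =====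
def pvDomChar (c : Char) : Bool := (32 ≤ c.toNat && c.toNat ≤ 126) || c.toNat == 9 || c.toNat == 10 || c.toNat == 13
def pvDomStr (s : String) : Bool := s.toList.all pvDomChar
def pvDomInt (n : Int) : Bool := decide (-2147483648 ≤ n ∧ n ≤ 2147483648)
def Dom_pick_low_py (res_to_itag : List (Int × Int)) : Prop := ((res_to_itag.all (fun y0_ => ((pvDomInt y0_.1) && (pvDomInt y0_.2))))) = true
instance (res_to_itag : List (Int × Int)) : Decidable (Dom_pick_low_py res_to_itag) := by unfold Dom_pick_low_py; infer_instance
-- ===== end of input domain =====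

-- B replaces A's two phases (membership test for 360, then sorted()[0] of the below-360 keys)
-- by a single scan keeping two accumulators; same result (objective: alternative).

-- ===== PORT A =====
-- A: early return on empty dict; membership test '360 in res_to_itag' (keys); comprehension over the
-- keys filtered to < 360, sorted, first element; indexing res_to_itag[target] = first match in the
-- association list (guarded by the membership test, so the .getD 0 default is unreachable).
def pick_low_py (res_to_itag : List (Int × Int)) : Option (Int × Int) :=
  if res_to_itag = [] then none
  else if (res_to_itag.map Prod.fst).contains 360 then
    some ((((res_to_itag.find? (fun p => p.1 == 360)).map Prod.snd).getD 0, 360))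
  else
    match PySem.List.sorted ((res_to_itag.map Prod.fst).filter (fun r => decide (r < 360))) (fun x => x) false with
    | [] => none
    | t :: _ => some ((((res_to_itag.find? (fun p => p.1 == t)).map Prod.snd).getD 0, t))

-- ===== PORT B =====
-- B's loop: state = (itag_360 : Option Int, (best_res, best_itag) : Option (Int × Int)).
def pickLowLoop : List (Int × Int) → Option Int → Option (Int × Int) → Option Int × Option (Int × Int)
  | [], i3, b => (i3, b)
  | (r, t) :: rest, i3, b =>
    if r = 360 ∧ i3 = none then pickLowLoop rest (some t) b
    else if r < 360 ∧ (b.all (fun q => decide (r < q.1))) = true then pickLowLoop rest i3 (some (r, t))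
    else pickLowLoop rest i3 b

def pick_low_py_alt (res_to_itag : List (Int × Int)) : Option (Int × Int) :=
  match pickLowLoop res_to_itag none none with
  | (some t, _) => some (t, 360)
  | (none, some (br, bt)) => some (bt, br)
  | (none, none) => none

-- ===== PRECONDITION & SPEC =====
def Spec_pick_low_py (res_to_itag : List (Int × Int)) (out : Option (Int × Int)) : Prop := out = pick_low_py_alt res_to_itag
instance (res_to_itag : List (Int × Int)) (out : Option (Int × Int)) : Decidable (Spec_pick_low_py res_to_itag out) := by unfold Spec_pick_low_py; infer_instance

-- ===== CLAIM (what is proved, stated in full; the proofs are below) =====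
def Claim_equal_pick_low_py : Prop := ∀ (res_to_itag : List (Int × Int)), Dom_pick_low_py res_to_itag → Spec_pick_low_py res_to_itag (pick_low_py res_to_itag)

-- ===== LEMMAS AND PROOFS =====

-- left-biased "min by first component" merge
def mergeB : Option (Int × Int) → Option (Int × Int) → Option (Int × Int)
  | none, m => m
  | some q, none => some q
  | some q, some q' => if q'.1 < q.1 then some q' else some q

-- first entry whose key attains the minimum of the below-360 keys
def bestBelow : List (Int × Int) → Option (Int × Int)
  | [] => none
  | (r, t) :: rest => if r < 360 then mergeB (some (r, t)) (bestBelow rest) else bestBelow rest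

theorem mergeB_some_assoc (b : Option (Int × Int)) (q : Int × Int) (m : Option (Int × Int)) :
    mergeB b (mergeB (some q) m) = mergeB (mergeB b (some q)) m := by
  obtain ⟨q1, q2⟩ := q
  cases b with
  | none => rfl
  | some p =>
    obtain ⟨p1, p2⟩ := p
    cases m with
    | none =>
      by_cases h : q1 < p1 <;> simp [mergeB, h]
    | some p' =>
      obtain ⟨c1, c2⟩ := p'
      by_cases h1 : c1 < q1 <;> by_cases h2 : q1 < p1 <;> by_cases h3 : c1 < p1 <;>
        simp [mergeB, h1, h2, h3] <;> omega

theorem pickLowLoop_fst (d : List (Int × Int)) :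
    ∀ i3 b, (pickLowLoop d i3 b).1 =
      match i3 with
      | some t => some t
      | none => (d.find? (fun p => p.1 == 360)).map Prod.snd := by
  induction d with
  | nil => intro i3 b; cases i3 <;> simp [pickLowLoop]
  | cons p rest ih =>
    intro i3 b
    obtain ⟨r, t⟩ := p
    by_cases h1 : r = 360 ∧ i3 = none
    · obtain ⟨hr, hi⟩ := h1
      subst hr hi
      simp [pickLowLoop, ih, List.find?]
    · rw [show pickLowLoop ((r, t) :: rest) i3 b =
        (if r = 360 ∧ i3 = none then pickLowLoop rest (some t) b
         else if r < 360 ∧ (b.all (fun q => decide (r < q.1))) = true then pickLowLoop rest i3 (some (r, t))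
         else pickLowLoop rest i3 b) from rfl]
      rw [if_neg h1]
      cases i3 with
      | some t' => split_ifs <;> simp [ih]
      | none =>
        have hr : (r == 360) = false := by
          simp only [beq_eq_false_iff_ne, ne_eq]
          exact fun h => h1 ⟨h, rfl⟩
        split_ifs <;> simp [ih, List.find?, hr]

theorem pickLowLoop_snd (d : List (Int × Int)) :
    ∀ i3 b, (pickLowLoop d i3 b).2 = mergeB b (bestBelow d) := by
  induction d with
  | nil => intro i3 b; cases b <;> simp [pickLowLoop, bestBelow, mergeB]
  | cons p rest ih =>
    intro i3 b
    obtain ⟨r, t⟩ := p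
    rw [show pickLowLoop ((r, t) :: rest) i3 b =
      (if r = 360 ∧ i3 = none then pickLowLoop rest (some t) b
       else if r < 360 ∧ (b.all (fun q => decide (r < q.1))) = true then pickLowLoop rest i3 (some (r, t))
       else pickLowLoop rest i3 b) from rfl]
    by_cases h1 : r = 360 ∧ i3 = none
    · rw [if_pos h1, ih]
      have hnr : ¬ r < 360 := by rw [h1.1]; omega
      simp [bestBelow, hnr]
    · rw [if_neg h1]
      by_cases h2 : r < 360 ∧ (b.all (fun q => decide (r < q.1))) = true
      · rw [if_pos h2, ih]
        have hb : mergeB b (some (r, t)) = some (r, t) := by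
          cases b with
          | none => rfl
          | some q =>
            have := h2.2
            simp [Option.all] at this
            simp [mergeB, this]
        rw [show bestBelow ((r, t) :: rest) = mergeB (some (r, t)) (bestBelow rest) from by
              simp [bestBelow, h2.1]]
        rw [mergeB_some_assoc, hb]
      · rw [if_neg h2, ih]
        by_cases hr : r < 360
        · obtain ⟨q, hq⟩ : ∃ q, b = some q := by
            cases b with
            | none => exact absurd ⟨hr, by simp [Option.all]⟩ h2
            | some q => exact ⟨q, rfl⟩
          have hqr : ¬ r < q.1 := by
            intro hlt
            exact h2 ⟨hr, by simp [hq, Option.all, hlt]⟩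
          rw [show bestBelow ((r, t) :: rest) = mergeB (some (r, t)) (bestBelow rest) from by
                simp [bestBelow, hr]]
          rw [mergeB_some_assoc]
          have hbb : mergeB b (some (r, t)) = b := by
            simp [hq, mergeB, hqr]
          rw [hbb]
        · simp [bestBelow, hr]

theorem bestBelow_eq_none (d : List (Int × Int)) :
    bestBelow d = none ↔ ∀ p ∈ d, ¬ p.1 < 360 := by
  induction d with
  | nil => simp [bestBelow]
  | cons p rest ih =>
    obtain ⟨r, t⟩ := p
    by_cases hr : r < 360
    · simp only [bestBelow, if_pos hr]
      constructor
      · intro h; exfalso; cases hb : bestBelow rest <;> simp [mergeB, hb] at h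
        split at h <;> simp_all
      · intro h; exact absurd hr (h (r, t) (by simp))
    · simp only [bestBelow, if_neg hr]
      rw [ih]
      constructor
      · intro h p hp
        rcases List.mem_cons.mp hp with h1 | h2
        · subst h1; exact hr
        · exact h p h2
      · intro h p hp; exact h p (List.mem_cons_of_mem _ hp)

theorem bestBelow_eq_some (d : List (Int × Int)) (q : Int × Int) (h : bestBelow d = some q) :
    d.find? (fun p => p.1 == q.1) = some q ∧ q.1 < 360 ∧ ∀ p ∈ d, p.1 < 360 → q.1 ≤ p.1 := by
  induction d generalizing q with
  | nil => simp [bestBelow] at h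
  | cons p rest ih =>
    obtain ⟨r, t⟩ := p
    by_cases hr : r < 360
    · rw [show bestBelow ((r, t) :: rest) = mergeB (some (r, t)) (bestBelow rest) from by
           simp [bestBelow, hr]] at h
      cases hb : bestBelow rest with
      | none =>
        rw [hb] at h
        simp [mergeB] at h
        subst h
        refine ⟨by rw [List.find?_cons_of_pos (by simp)], hr, ?_⟩
        intro p hp hplt
        rcases List.mem_cons.mp hp with h1 | h2
        · subst h1; rfl
        · exact absurd hplt ((bestBelow_eq_none rest).mp hb p h2)
      | some q' =>
        rw [hb] at h
        obtain ⟨hf, hlt, hmin⟩ := ih q' hb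
        simp only [mergeB] at h
        split_ifs at h with hcmp
        · injection h with h; subst h
          refine ⟨?_, hlt, ?_⟩
          · rw [List.find?_cons_of_neg (by simp; omega)]
            exact hf
          · intro p hp hplt
            rcases List.mem_cons.mp hp with h1 | h2
            · subst h1; omega
            · exact hmin p h2 hplt
        · injection h with h; subst h
          refine ⟨by rw [List.find?_cons_of_pos (by simp)], hr, ?_⟩
          intro p hp hplt
          rcases List.mem_cons.mp hp with h1 | h2
          · subst h1; rfl
          · have := hmin p h2 hplt; omega
    · rw [show bestBelow ((r, t) :: rest) = bestBelow rest from by simp [bestBelow, hr]] at h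
      obtain ⟨hf, hlt, hmin⟩ := ih q h
      refine ⟨?_, hlt, ?_⟩
      · rw [List.find?_cons_of_neg (by simp; omega)]
        exact hf
      · intro p hp hplt
        rcases List.mem_cons.mp hp with h1 | h2
        · subst h1; exact absurd hplt hr
        · exact hmin p h2 hplt

theorem alt_char (d : List (Int × Int)) :
    pick_low_py_alt d =
      match (d.find? (fun p => p.1 == 360)).map Prod.snd with
      | some t => some (t, 360)
      | none =>
        match bestBelow d with
        | some (br, bt) => some (bt, br)
        | none => none := by
  unfold pick_low_py_alt
  have h1 := pickLowLoop_fst d none none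
  have h2 := pickLowLoop_snd d none none
  rcases hxy : pickLowLoop d none none with ⟨x, y⟩
  rw [hxy] at h1 h2
  simp only [mergeB] at h2
  simp only at h1 h2
  subst h1 h2
  cases hA : (d.find? (fun p => p.1 == 360)).map Prod.snd with
  | some t => rfl
  | none =>
    cases hB : bestBelow d with
    | none => rfl
    | some q => obtain ⟨br, bt⟩ := q; rfl

theorem pick_low_eq (d : List (Int × Int)) : pick_low_py d = pick_low_py_alt d := by
  rw [alt_char]
  unfold pick_low_py
  by_cases hnil : d = []
  · subst hnil
    simp [List.find?, bestBelow]
  rw [if_neg hnil]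
  by_cases h360 : (d.map Prod.fst).contains 360 = true
  · rw [if_pos h360]
    have hmem : ∃ p ∈ d, (fun p => p.1 == (360 : Int)) p = true := by
      simp only [List.contains_iff_exists_mem_beq] at h360
      obtain ⟨k, hk, hbeq⟩ := h360
      obtain ⟨p, hp, rfl⟩ := List.mem_map.mp hk
      refine ⟨p, hp, ?_⟩
      simp only [beq_iff_eq] at hbeq ⊢
      omega
    obtain ⟨p, hp⟩ := List.find?_isSome.mpr hmem |> Option.isSome_iff_exists.mp
    rw [hp]
    rfl
  · rw [if_neg h360]
    have hf : d.find? (fun p => p.1 == 360) = none := by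
      rw [List.find?_eq_none]
      intro p hp hbeq
      apply h360
      simp only [List.contains_iff_exists_mem_beq]
      refine ⟨p.1, List.mem_map_of_mem hp, ?_⟩
      simp only [beq_iff_eq] at hbeq ⊢
      omega
    rw [hf]
    cases hs : PySem.List.sorted ((d.map Prod.fst).filter (fun r => decide (r < 360))) (fun x => x) false with
    | nil =>
      have hbl : (d.map Prod.fst).filter (fun r => decide (r < 360)) = [] :=
        (PySem.List.sorted_eq_nil_iff _ _ _).mp hs
      have hbb : bestBelow d = none := by
        rw [bestBelow_eq_none]
        intro p hp hplt
        have : p.1 ∈ (d.map Prod.fst).filter (fun r => decide (r < 360)) := by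
          simp only [List.mem_filter]
          exact ⟨List.mem_map_of_mem hp, by simp [hplt]⟩
        rw [hbl] at this
        exact absurd this (List.not_mem_nil)
      rw [hbb]
      rfl
    | cons m rest' =>
      have hm_mem : m ∈ (d.map Prod.fst).filter (fun r => decide (r < 360)) := by
        have hm : m ∈ PySem.List.sorted ((d.map Prod.fst).filter (fun r => decide (r < 360))) (fun x => x) false := by
          rw [hs]; simp
        exact (PySem.List.mem_sorted _ _ _ _).mp hm
      have hm_min : ∀ y ∈ (d.map Prod.fst).filter (fun r => decide (r < 360)), m ≤ y :=
        PySem.List.key_head_sorted_le _ (fun x => x) hs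
      obtain ⟨hm_in, hm_lt⟩ : m ∈ d.map Prod.fst ∧ m < 360 := by
        simpa using List.mem_filter.mp hm_mem
      obtain ⟨q, hq⟩ : ∃ q, bestBelow d = some q := by
        cases hb : bestBelow d with
        | none =>
          obtain ⟨p, hp, rfl⟩ := List.mem_map.mp hm_in
          exact absurd hm_lt ((bestBelow_eq_none d).mp hb p hp)
        | some q => exact ⟨q, rfl⟩
      obtain ⟨hfq, hqlt, hqmin⟩ := bestBelow_eq_some d q hq
      have hqm : q.1 = m := by
        obtain ⟨p, hp, rfl⟩ := List.mem_map.mp hm_in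
        have h1 := hqmin p hp hm_lt
        have hq_in_bl : q.1 ∈ (d.map Prod.fst).filter (fun r => decide (r < 360)) := by
          simp only [List.mem_filter]
          exact ⟨List.mem_map_of_mem (List.mem_of_find?_eq_some hfq), by simp [hqlt]⟩
        have h2 := hm_min q.1 hq_in_bl
        omega
      obtain ⟨q1, q2⟩ := q
      simp only at hqm hfq
      subst hqm
      rw [hq]
      show some ((((d.find? (fun p => p.1 == q1)).map Prod.snd).getD 0, q1)) = some (q2, q1)
      rw [hfq]
      rfl

-- ===== VERDICT (by name: the statement is the Claim_ definition above) =====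
theorem pick_low_py_spec : Claim_equal_pick_low_py := by
  intro d _
  unfold Spec_pick_low_py
  exact pick_low_eq d
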